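-- pv_equiv track=rewrite | github.com/sonGokuKhk98/Relator | app.py | _unique_select_list
-- ===== SOURCE A (Python) =====
-- from typing import List, Dict, Optional, Any
--
-- def _unique_select_list(select_cols: List[str]) -> List[str]:
--     """Alias select columns to avoid duplicate names."""
--     seen = set()
--     aliased = []
--     for col in select_cols:
--         if col == "*":
--             aliased.append(col)
--             continue
--         base = col.split(".")[-1]
--         if base in seen:
--             alias = col.replace(".", "_")
--             aliased.append(f"{col} AS {alias}")
--         else:
--             aliased.append(col)
--         seen.add(base)
--     return aliased
-- ===== SOURCE B (Python) =====
-- def _unique_select_list(select_cols):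
--     """Alias select columns to avoid duplicate names."""
--     first = {}
--     for i, col in enumerate(select_cols):
--         if col != "*":
--             base = col.split(".")[-1]
--             if base not in first:
--                 first[base] = i
--     out = []
--     for i, col in enumerate(select_cols):
--         if col == "*" or first.get(col.split(".")[-1], -1) == i:
--             out.append(col)
--         else:
--             out.append(f'{col} AS {col.replace(".", "_")}')
--     return out
-- ===== Notes on version B (the rewrite author's own statement) =====
-- stated objective: alternative
-- what changed: Replaces A's single pass with an incremental seen-set by two passes: first a dict mapping each base name to the index of its first non-'*' occurrence, then an index-aware emit pass that aliases a column exactly when it is not that first occurrence.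
import Mathlib
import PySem

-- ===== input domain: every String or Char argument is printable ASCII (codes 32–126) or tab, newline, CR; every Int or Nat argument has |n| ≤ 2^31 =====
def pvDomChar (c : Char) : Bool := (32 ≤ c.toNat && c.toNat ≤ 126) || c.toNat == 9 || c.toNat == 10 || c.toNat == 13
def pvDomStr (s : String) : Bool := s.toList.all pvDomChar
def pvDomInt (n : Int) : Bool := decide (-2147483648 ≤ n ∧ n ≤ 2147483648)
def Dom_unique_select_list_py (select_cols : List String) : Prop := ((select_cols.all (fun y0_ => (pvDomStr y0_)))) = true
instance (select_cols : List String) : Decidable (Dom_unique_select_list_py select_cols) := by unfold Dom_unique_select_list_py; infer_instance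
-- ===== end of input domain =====

-- B replaces A's incremental seen-set loop by a two-pass scheme (a precomputed
-- first-occurrence index per base name, then an index-aware emit pass); objective: alternative decomposition.

-- shared by both ports: both Pythons literally compute col.split(".")[-1]
-- (split? is some for the non-empty separator ".", so the .getD [] is never taken)
def uslBase (col : String) : String :=
  PySem.List.pyGetD ((PySem.Str.split? col ".").getD []) (-1) ""

-- ===== PORT A =====
def uslStepA (st : PySem.Set String × List String) (col : String) :
    PySem.Set String × List String :=
  if col = "*" then (st.1, st.2 ++ [col])
  else
    (PySem.Set.add st.1 (uslBase col),
     if PySem.Set.contains st.1 (uslBase col) then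
       st.2 ++ [col ++ " AS " ++ PySem.Str.replace col "." "_"]
     else st.2 ++ [col])

def unique_select_list_py (select_cols : List String) : List String :=
  (select_cols.foldl uslStepA (PySem.Set.empty, [])).2

-- ===== PORT B =====
def uslStep (d : PySem.Dict String Int) (p : Int × String) : PySem.Dict String Int :=
  if p.2 = "*" then d
  else if d.contains (uslBase p.2) then d
  else d.insert (uslBase p.2) p.1

def uslEmit (first : PySem.Dict String Int) (p : Int × String) : String :=
  if p.2 = "*" ∨ first.getD (uslBase p.2) (-1) = p.1 then p.2
  else p.2 ++ " AS " ++ PySem.Str.replace p.2 "." "_"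

def unique_select_list_py_alt (select_cols : List String) : List String :=
  (PySem.List.enumerate select_cols).map
    (uslEmit ((PySem.List.enumerate select_cols).foldl uslStep PySem.Dict.empty))

-- ===== PRECONDITION & SPEC =====
def Spec_unique_select_list_py (select_cols : List String) (out : List String) : Prop := out = unique_select_list_py_alt select_cols
instance (select_cols : List String) (out : List String) : Decidable (Spec_unique_select_list_py select_cols out) := by unfold Spec_unique_select_list_py; infer_instance

-- ===== CLAIM (what is proved, stated in full; the proofs are below) =====
def Claim_equal_unique_select_list_py : Prop := ∀ (select_cols : List String), Dom_unique_select_list_py select_cols → Spec_unique_select_list_py select_cols (unique_select_list_py select_cols)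

-- ===== LEMMAS AND PROOFS =====

-- common specification both ports are reduced to
def uslSpec (seen : PySem.Set String) : List String → List String
  | [] => []
  | col :: rest =>
    if col = "*" then col :: uslSpec seen rest
    else
      (if PySem.Set.contains seen (uslBase col) then
        col ++ " AS " ++ PySem.Str.replace col "." "_"
      else col) :: uslSpec (PySem.Set.add seen (uslBase col)) rest

theorem uslA_spec (xs : List String) :
    ∀ (seen : PySem.Set String) (acc : List String),
      (xs.foldl uslStepA (seen, acc)).2 = acc ++ uslSpec seen xs := by
  induction xs with
  | nil => intro seen acc; simp [uslSpec]
  | cons c rest ih =>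
    intro seen acc
    simp only [List.foldl, uslStepA, uslSpec]
    by_cases h : c = "*"
    · simp [h, ih]
    · rw [if_neg h, if_neg h, ih]
      split_ifs <;> simp

theorem uslStep_get?_of_contains (d : PySem.Dict String Int) (p : Int × String)
    (b : String) (h : d.contains b = true) : (uslStep d p).get? b = d.get? b := by
  unfold uslStep
  split_ifs with h1 h2
  · rfl
  · rfl
  · exact PySem.Dict.get?_insert_of_ne _ _ (by rintro rfl; simp_all)

theorem uslFold_get?_of_contains (l : List (Int × String)) :
    ∀ (d : PySem.Dict String Int) (b : String), d.contains b = true →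
      (l.foldl uslStep d).get? b = d.get? b := by
  induction l with
  | nil => intro d b _; rfl
  | cons p rest ih =>
    intro d b h
    have hs := uslStep_get?_of_contains d p b h
    have hc : (uslStep d p).contains b = true := by
      rw [PySem.Dict.contains_eq_isSome_get?, hs, ← PySem.Dict.contains_eq_isSome_get?]
      exact h
    simpa [hs] using ih (uslStep d p) b hc

theorem uslB_main (xs : List String) :
    ∀ (s : Int) (d : PySem.Dict String Int),
      (∀ b v, d.get? b = some v → v < s) →
      (PySem.List.enumerate xs s).map
          (uslEmit ((PySem.List.enumerate xs s).foldl uslStep d)) =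
        uslSpec d.keys xs := by
  induction xs with
  | nil => intro s d _; simp [PySem.List.enumerate_nil, uslSpec]
  | cons c rest ih =>
    intro s d hbd
    rw [PySem.List.enumerate_cons]
    simp only [List.map, List.foldl, uslSpec]
    by_cases h : c = "*"
    · have hstep : uslStep d (s, c) = d := by simp [uslStep, h]
      rw [hstep, if_pos h]
      refine congrArg₂ List.cons ?_ (ih (s + 1) d (fun b v hv => by have := hbd b v hv; omega))
      simp [uslEmit, h]
    · rw [if_neg h]
      by_cases hc : d.contains (uslBase c) = true
      · -- already seen: no insert; the first-occurrence index is < s, so alias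
        have hstep : uslStep d (s, c) = d := by simp [uslStep, h, hc]
        rw [hstep]
        obtain ⟨v, hv⟩ : ∃ v, d.get? (uslBase c) = some v := by
          rw [PySem.Dict.contains_eq_isSome_get?] at hc
          exact Option.isSome_iff_exists.mp hc
        have hget := uslFold_get?_of_contains (PySem.List.enumerate rest (s + 1)) d (uslBase c) hc
        have hlt := hbd _ _ hv
        have hmem : uslBase c ∈ d.keys := by
          rw [PySem.Dict.contains_eq_decide_mem_keys] at hc
          exact of_decide_eq_true hc
        have hkeys : PySem.Set.contains d.keys (uslBase c) = true := by
          simpa [PySem.Set.contains] using hmem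
        have hadd : PySem.Set.add d.keys (uslBase c) = d.keys := by
          simp [PySem.Set.add, PySem.Set.contains, hmem]
        rw [hkeys, hadd, if_pos rfl]
        refine congrArg₂ List.cons ?_ (ih (s + 1) d (fun b v hv => by have := hbd b v hv; omega))
        have : ¬ ((List.foldl uslStep d (PySem.List.enumerate rest (s + 1))).getD (uslBase c) (-1) = s) := by
          rw [PySem.Dict.getD, hget, hv]
          simp; omega
        simp [uslEmit, h, this]
      · -- first occurrence: insert index s; lookup in the full dict returns s
        have hstep : uslStep d (s, c) = d.insert (uslBase c) s := by
          simp [uslStep, h, hc]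
        rw [hstep]
        have hc' : (d.insert (uslBase c) s).contains (uslBase c) = true := by
          rw [PySem.Dict.contains_eq_isSome_get?, PySem.Dict.get?_insert_self]; rfl
        have hget := uslFold_get?_of_contains (PySem.List.enumerate rest (s + 1))
          (d.insert (uslBase c) s) (uslBase c) hc'
        have hnmem : uslBase c ∉ d.keys := by
          rw [PySem.Dict.contains_eq_decide_mem_keys] at hc
          simpa using hc
        have hkeys : PySem.Set.contains d.keys (uslBase c) = false := by
          simpa [PySem.Set.contains] using hnmem
        have hadd : PySem.Set.add d.keys (uslBase c) = (d.insert (uslBase c) s).keys := by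
          rw [PySem.Dict.keys_insert_of_not_contains _ _ (by simpa using hc)]
          simp [PySem.Set.add, PySem.Set.contains, hnmem]
        rw [hkeys, hadd]
        simp only [Bool.false_eq_true, if_false]
        have hbd' : ∀ b v, (d.insert (uslBase c) s).get? b = some v → v < s + 1 := by
          intro b v hv
          by_cases hb : b = uslBase c
          · subst hb; rw [PySem.Dict.get?_insert_self] at hv
            simp at hv; omega
          · rw [PySem.Dict.get?_insert_of_ne _ _ hb] at hv
            have := hbd b v hv; omega
        refine congrArg₂ List.cons ?_ (ih (s + 1) _ hbd')
        have : (List.foldl uslStep (d.insert (uslBase c) s) (PySem.List.enumerate rest (s + 1))).getD (uslBase c) (-1) = s := by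
          rw [PySem.Dict.getD, hget, PySem.Dict.get?_insert_self]; rfl
        simp [uslEmit, h, this]

-- ===== VERDICT (by name: the statement is the Claim_ definition above) =====
theorem unique_select_list_py_spec : Claim_equal_unique_select_list_py := by
  intro xs _
  unfold Spec_unique_select_list_py unique_select_list_py unique_select_list_py_alt
  rw [uslA_spec, uslB_main xs 0 PySem.Dict.empty
    (by intro b v hv; simp [PySem.Dict.get?, PySem.Dict.empty] at hv)]
  rfl
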